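-- pv_equiv track=rewrite | github.com/eschmidt42/fintl | src/fintl/accounts_etl/utils.py | check_if_german_number
-- ===== SOURCE A (Python) =====
-- def check_if_german_number(s: str) -> bool:
--     comma_count = s.count(",")
--     dot_count = s.count(".")
--
--     max_one_comma = comma_count <= 1
--     if not max_one_comma:
--         return False
--
--     comma_pos = s.find(",")
--     dot_pos = [i for i, _s in enumerate(s) if _s == "."]
--
--     has_dot = dot_count > 0
--     has_comma = comma_count > 0
--
--     ge_punctuation_order = True
--     if has_comma and has_dot:
--         # case like 1.123,0 fine but 1,234.0 not
--         ge_punctuation_order = dot_pos[-1] < comma_pos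
--     elif has_dot:
--         # case like "1.2" or "1.23"
--         _s = s.split(".")
--         ge_punctuation_order = len(_s[-1]) == 3
--     elif has_comma:
--         # case like "1,234"
--         ge_punctuation_order = True
--
--     return max_one_comma and ge_punctuation_order
-- ===== SOURCE B (Python) =====
-- def check_if_german_number(s: str) -> bool:
--     # Scan right-to-left; the decision is made at the RIGHTMOST separator.
--     tail = 0
--     for i in range(len(s) - 1, -1, -1):
--         c = s[i]
--         if c == ',':
--             return ',' not in s[:i]
--         if c == '.':
--             return ',' not in s[:i] and tail == 3
--         tail += 1
--     return True
-- ===== Notes on version B (the rewrite author's own statement) =====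
-- stated objective: alternative
-- what changed: B scans the string right-to-left and decides at the rightmost separator it meets (early exit), using one prefix membership test instead of A's staged left-to-right builtin passes (two counts, a find, an enumerate comprehension and a split).
import Mathlib
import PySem

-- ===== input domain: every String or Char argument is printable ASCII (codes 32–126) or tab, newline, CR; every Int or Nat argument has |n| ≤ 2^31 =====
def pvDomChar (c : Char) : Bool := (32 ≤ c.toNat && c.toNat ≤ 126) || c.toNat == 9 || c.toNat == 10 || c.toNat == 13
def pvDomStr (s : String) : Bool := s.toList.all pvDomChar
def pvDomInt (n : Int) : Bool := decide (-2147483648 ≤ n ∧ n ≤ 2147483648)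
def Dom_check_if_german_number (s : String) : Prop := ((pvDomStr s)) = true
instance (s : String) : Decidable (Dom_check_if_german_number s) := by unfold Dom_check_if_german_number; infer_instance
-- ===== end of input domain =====

-- B scans the string right-to-left, deciding at the rightmost separator with an early exit,
-- instead of A's staged left-to-right builtin passes (alternative, same O(n)).

-- ===== PORT A =====
def check_if_german_number (s : String) : Bool :=
  let l := s.toList
  let comma_count : Nat := PySem.Chars.count l [',']      -- s.count(",")
  let dot_count : Nat := PySem.Chars.count l ['.']        -- s.count(".")
  let max_one_comma : Bool := comma_count ≤ 1
  if !max_one_comma then false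
  else
    let comma_pos : Int := PySem.Chars.find l [',']       -- s.find(",")
    let dot_pos : List Int :=
      ((PySem.List.enumerate l 0).filter (fun p => p.2 == '.')).map (·.1)   -- [i for i,_s in enumerate(s) if _s=="."]
    let has_dot : Bool := dot_count > 0
    let has_comma : Bool := comma_count > 0
    let ge_punctuation_order : Bool :=
      if has_comma && has_dot then
        match PySem.List.pyGet? dot_pos (-1) with          -- dot_pos[-1]
        | some d => decide (d < comma_pos)
        | none => false                                     -- unreachable: has_dot ⇒ dot_pos ≠ []
      else if has_dot then
        let parts := PySem.Chars.splitOn l ['.']           -- s.split(".")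
        match PySem.List.pyGet? parts (-1) with            -- _s[-1]
        | some p => p.length == 3
        | none => false                                     -- unreachable: split is never empty
      else true                                             -- 'elif has_comma: True' and the initial True coincide
    max_one_comma && ge_punctuation_order

-- ===== PORT B =====
-- Source B's 'for i in range(len(s)-1, -1, -1)' with s[i] is transcribed as structural recursion
-- over s.toList.reverse: the head is s[i] and the remainder, re-reversed, is the prefix s[:i].
def pvAltGo : List Char → Nat → Bool
  | [], _ => true
  | c :: rest, tail =>
    if c = ',' then !(rest.reverse.contains ',')                       -- return ',' not in s[:i]
    else if c = '.' then !(rest.reverse.contains ',') && (tail == 3)   -- return ',' not in s[:i] and tail == 3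
    else pvAltGo rest (tail + 1)                                        -- tail += 1

def check_if_german_number_alt (s : String) : Bool := pvAltGo s.toList.reverse 0

-- ===== PRECONDITION & SPEC =====
def Spec_check_if_german_number (s : String) (out : Bool) : Prop := out = check_if_german_number_alt s
instance (s : String) (out : Bool) : Decidable (Spec_check_if_german_number s out) := by unfold Spec_check_if_german_number; infer_instance

-- ===== CLAIM (what is proved, stated in full; the proofs are below) =====
def Claim_equal_check_if_german_number : Prop := ∀ (s : String), Dom_check_if_german_number s → Spec_check_if_german_number s (check_if_german_number s)

-- ===== LEMMAS AND PROOFS =====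

/-- Index of the first occurrence of `c`. -/
def pvFirstIdx (c : Char) : List Char → Option Nat
  | [] => none
  | x :: xs => if x = c then some 0 else (pvFirstIdx c xs).map (· + 1)

/-- Index of the last occurrence of `c`. -/
def pvLastIdx (c : Char) : List Char → Option Nat
  | [] => none
  | x :: xs =>
    match pvLastIdx c xs with
    | some j => some (j + 1)
    | none => if x = c then some 0 else none

theorem pvLastIdx_lt_length {c : Char} {l : List Char} {j : Nat}
    (h : pvLastIdx c l = some j) : j < l.length := by
  induction l generalizing j with
  | nil => simp [pvLastIdx] at h
  | cons x xs ih =>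
    simp only [pvLastIdx] at h
    cases hx : pvLastIdx c xs with
    | some k =>
      simp only [hx, Option.some.injEq] at h
      have := ih hx
      simp only [List.length_cons]
      omega
    | none =>
      simp only [hx] at h
      split_ifs at h with hc
      all_goals try simp only [Option.some.injEq] at h
      all_goals simp only [List.length_cons]
      all_goals omega

theorem pvLastIdx_eq_none_iff (c : Char) (l : List Char) :
    pvLastIdx c l = none ↔ l.count c = 0 := by
  induction l with
  | nil => simp [pvLastIdx]
  | cons x xs ih =>
    simp only [pvLastIdx]
    cases hx : pvLastIdx c xs with
    | some k =>
      simp [hx] at ih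
      simp [List.count_cons, ih]
      try omega
    | none =>
      simp [hx] at ih
      by_cases hc : x = c <;> simp [hc, List.count_cons, ih]

theorem pv_count_go (c : Char) (l : List Char) (fuel acc : Nat) (hf : l.length ≤ fuel) :
    PySem.Chars.count.go [c] fuel l acc = acc + l.count c := by
  induction l generalizing fuel acc with
  | nil => cases fuel <;> rw [PySem.Chars.count.go] <;> simp
  | cons x xs ih =>
    cases fuel with
    | zero => simp at hf
    | succ f =>
      rw [PySem.Chars.count.go]
      simp only [List.length_cons, Nat.succ_le_succ_iff] at hf
      by_cases h : c = x
      · rw [if_pos (by simp [List.isPrefixOf, h])]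
        rw [show List.drop (List.length [c]) (x :: xs) = xs from rfl]
        rw [ih f (acc + 1) hf]
        have hx : (x == c) = true := by simp [h.symm]
        rw [List.count_cons, hx]
        simp
        omega
      · rw [if_neg (by simp [List.isPrefixOf]; intro hh; exact h hh)]
        rw [ih f acc hf]
        have hx : (x == c) = false := by simp; intro hh; exact h hh.symm
        rw [List.count_cons, hx]
        simp

theorem pv_count_single (c : Char) (l : List Char) :
    PySem.Chars.count l [c] = l.count c := by
  rw [PySem.Chars.count]
  simp [pv_count_go c l l.length 0 le_rfl]

theorem pv_find_go (c : Char) (l : List Char) (k : Nat) :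
    PySem.Chars.find.go [c] l k =
      match pvFirstIdx c l with
      | some j => ((k + j : Nat) : Int)
      | none => -1 := by
  induction l generalizing k with
  | nil => rw [PySem.Chars.find.go]; simp [pvFirstIdx]
  | cons x xs ih =>
    rw [PySem.Chars.find.go]
    by_cases h : c = x
    · rw [if_pos (by simp [List.isPrefixOf, h])]
      simp [pvFirstIdx, h.symm]
    · rw [if_neg (by simp [List.isPrefixOf]; intro hh; exact h hh)]
      have h' : ¬ x = c := fun hh => h hh.symm
      rw [ih (k + 1)]
      simp only [pvFirstIdx, if_neg h']
      cases pvFirstIdx c xs with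
      | some j => simp; push_cast; ring
      | none => simp

theorem pv_find_single (c : Char) (l : List Char) :
    PySem.Chars.find l [c] =
      match pvFirstIdx c l with
      | some j => (j : Int)
      | none => -1 := by
  rw [PySem.Chars.find, pv_find_go]
  cases pvFirstIdx c l with
  | some j => simp
  | none => rfl

theorem pv_splitOn_go_last (c : Char) (l : List Char) (fuel : Nat) (cur : List Char)
    (acc : List (List Char)) (hf : l.length ≤ fuel) :
    (PySem.Chars.splitOn.go [c] fuel l cur acc).getLast? =
      some (match pvLastIdx c l with
            | some j => l.drop (j + 1)
            | none => cur.reverse ++ l) := by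
  induction l generalizing fuel cur acc with
  | nil =>
    cases fuel <;> rw [PySem.Chars.splitOn.go] <;> simp [pvLastIdx, List.getLast?_reverse]
  | cons x xs ih =>
    cases fuel with
    | zero => simp at hf
    | succ f =>
      rw [PySem.Chars.splitOn.go]
      simp only [List.length_cons, Nat.succ_le_succ_iff] at hf
      by_cases h : c = x
      · rw [if_pos (by simp [List.isPrefixOf, h])]
        rw [show List.drop (List.length [c]) (x :: xs) = xs from rfl]
        rw [ih f [] (cur.reverse :: acc) hf]
        simp only [pvLastIdx]
        cases hx : pvLastIdx c xs with
        | some j => simp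
        | none => simp [h.symm]
      · rw [if_neg (by simp [List.isPrefixOf]; intro hh; exact h hh)]
        rw [ih f (x :: cur) acc hf]
        simp only [pvLastIdx]
        have h' : ¬ x = c := fun hh => h hh.symm
        cases hx : pvLastIdx c xs with
        | some j => simp
        | none => simp [h']

theorem pv_pyGet_neg_one_getLast {α : Type} (xs : List α) :
    PySem.List.pyGet? xs (-1) = xs.getLast? := by
  rcases xs.eq_nil_or_concat with rfl | ⟨ys, a, rfl⟩
  · rfl
  · simp [PySem.List.pyGet?, PySem.List.pyIdx?]

theorem pv_splitOn_last (c : Char) (l : List Char) :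
    (PySem.Chars.splitOn l [c]).getLast? =
      some (match pvLastIdx c l with
            | some j => l.drop (j + 1)
            | none => l) := by
  rw [PySem.Chars.splitOn, pv_splitOn_go_last c l _ [] [] (by omega)]
  cases pvLastIdx c l with
  | some j => rfl
  | none => rfl

theorem pv_dotpos_last (c : Char) (l : List Char) (s : Nat) :
    (((PySem.List.enumerate l (s : Int)).filter (fun p => p.2 == c)).map (·.1)).getLast? =
      (pvLastIdx c l).map (fun j => ((s + j : Nat) : Int)) := by
  induction l generalizing s with
  | nil => simp [PySem.List.enumerate_nil, pvLastIdx]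
  | cons x xs ih =>
    rw [PySem.List.enumerate_cons]
    have hs : ((s : Int) + 1) = ((s + 1 : Nat) : Int) := by push_cast; ring
    rw [List.filter_cons]
    by_cases h : x = c
    · rw [if_pos (by simp [h])]
      rw [List.map_cons, List.getLast?_cons]
      rw [hs, ih (s + 1)]
      simp only [pvLastIdx]
      cases hx : pvLastIdx c xs with
      | some j =>
        simp only [Option.map_some, Option.getD_some]
        congr 1
        push_cast; ring
      | none => simp [h]
    · rw [if_neg (by simp [h])]
      rw [hs, ih (s + 1)]
      simp only [pvLastIdx]
      cases hx : pvLastIdx c xs with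
      | some j =>
        simp only [Option.map_some]
        congr 1
        push_cast; ring
      | none => simp [h]

/-- At the last index of `c`, the list really holds `c`. -/
theorem pvLastIdx_getElem? {c : Char} {l : List Char} {j : Nat}
    (h : pvLastIdx c l = some j) : l[j]? = some c := by
  induction l generalizing j with
  | nil => simp [pvLastIdx] at h
  | cons x xs ih =>
    simp only [pvLastIdx] at h
    cases hx : pvLastIdx c xs with
    | some k =>
      simp only [hx, Option.some.injEq] at h
      subst h
      simpa using ih hx
    | none =>
      simp only [hx] at h
      split_ifs at h with hc
      · cases h; simp [hc]

/-- Splitting the count at the last occurrence. -/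
theorem pv_count_take_last {c : Char} {l : List Char} {j : Nat}
    (h : pvLastIdx c l = some j) : l.count c = (l.take j).count c + 1 := by
  induction l generalizing j with
  | nil => simp [pvLastIdx] at h
  | cons x xs ih =>
    simp only [pvLastIdx] at h
    cases hx : pvLastIdx c xs with
    | some k =>
      simp only [hx, Option.some.injEq] at h
      subst h
      simp only [List.take_succ_cons, List.count_cons]
      have := ih hx
      omega
    | none =>
      simp only [hx] at h
      split_ifs at h with hc
      · cases h
        have hx0 : xs.count c = 0 := (pvLastIdx_eq_none_iff c xs).mp hx
        simp [List.count_cons, hc, hx0]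

/-- With at most one occurrence, first and last index coincide. -/
theorem pvFirst_eq_pvLast {c : Char} {l : List Char} (h : l.count c ≤ 1) :
    pvFirstIdx c l = pvLastIdx c l := by
  induction l with
  | nil => rfl
  | cons x xs ih =>
    simp only [List.count_cons] at h
    by_cases hx : x = c
    · have hxs : xs.count c = 0 := by simp [hx] at h; omega
      have : pvLastIdx c xs = none := (pvLastIdx_eq_none_iff c xs).mpr hxs
      simp [pvFirstIdx, pvLastIdx, hx, this]
    · have hxs : xs.count c ≤ 1 := by omega
      rw [pvFirstIdx, pvLastIdx, if_neg hx, ih hxs]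
      cases pvLastIdx c xs <;> simp [hx]

theorem pvLastIdx_append_singleton (c a : Char) (ys : List Char) :
    pvLastIdx c (ys ++ [a]) =
      if a = c then some ys.length else pvLastIdx c ys := by
  induction ys with
  | nil => by_cases h : a = c <;> simp [pvLastIdx, h]
  | cons x xs ih =>
    simp only [List.cons_append, pvLastIdx, ih]
    by_cases h : a = c
    · simp [h]
    · simp only [if_neg h]

/-- Proof-side characterisation of B's right-to-left scan on the original (unreversed) list. -/
def pvBSpec (l : List Char) (tail : Nat) : Bool :=
  match pvLastIdx ',' l, pvLastIdx '.' l with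
  | none, none => true
  | some i, none => !((l.take i).contains ',')
  | none, some j => !((l.take j).contains ',') && (tail + (l.length - 1 - j) == 3)
  | some i, some j =>
    if j < i then !((l.take i).contains ',')
    else !((l.take j).contains ',') && (tail + (l.length - 1 - j) == 3)

theorem pvAltGo_eq_bSpec (l : List Char) (tail : Nat) :
    pvAltGo l.reverse tail = pvBSpec l tail := by
  induction l using List.reverseRecOn generalizing tail with
  | nil => simp [pvAltGo, pvBSpec, pvLastIdx]
  | append_singleton ys a ih =>
    rw [List.reverse_append]
    simp only [List.reverse_cons, List.reverse_nil, List.nil_append, List.singleton_append]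
    by_cases hc : a = ','
    · subst hc
      rw [pvAltGo, if_pos rfl]
      rw [pvBSpec]
      rw [pvLastIdx_append_singleton, if_pos rfl, pvLastIdx_append_singleton, if_neg (by decide)]
      have ht : (ys ++ [',']).take ys.length = ys := by
        rw [List.take_append_of_le_length le_rfl, List.take_length]
      cases hx : pvLastIdx '.' ys with
      | none => simp [ht]
      | some j =>
        have := pvLastIdx_lt_length hx
        simp [ht, this]
    · by_cases hd : a = '.'
      · subst hd
        rw [pvAltGo, if_neg (by decide), if_pos rfl]
        rw [pvBSpec]
        rw [pvLastIdx_append_singleton, if_neg (by decide), pvLastIdx_append_singleton, if_pos rfl]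
        have ht : (ys ++ ['.']).take ys.length = ys := by
          rw [List.take_append_of_le_length le_rfl, List.take_length]
        have hl : (ys ++ ['.']).length - 1 - ys.length = 0 := by simp
        cases hx : pvLastIdx ',' ys with
        | none => simp [ht, hl]
        | some i =>
          have hi := pvLastIdx_lt_length hx
          have hni : ¬ ys.length < i := by omega
          simp [ht, hl, hni]
      · rw [pvAltGo, if_neg hc, if_neg hd, ih]
        rw [pvBSpec, pvBSpec]
        rw [pvLastIdx_append_singleton, if_neg hc, pvLastIdx_append_singleton, if_neg hd]
        cases hx : pvLastIdx ',' ys with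
        | none =>
          cases hy : pvLastIdx '.' ys with
          | none => rfl
          | some j =>
            have hj := pvLastIdx_lt_length hy
            have ht : (ys ++ [a]).take j = ys.take j :=
              List.take_append_of_le_length (by omega)
            have hlen : tail + ((ys ++ [a]).length - 1 - j) = (tail + 1) + (ys.length - 1 - j) := by
              simp only [List.length_append, List.length_cons, List.length_nil]
              omega
            have hq : tail + 1 + (ys.length - 1 - j) = tail + (ys.length - j) := by omega
            simp [ht, hq]
        | some i =>
          have hi := pvLastIdx_lt_length hx
          cases hy : pvLastIdx '.' ys with
          | none =>
            have ht : (ys ++ [a]).take i = ys.take i :=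
              List.take_append_of_le_length (by omega)
            simp [ht]
          | some j =>
            have hj := pvLastIdx_lt_length hy
            have hti : (ys ++ [a]).take i = ys.take i :=
              List.take_append_of_le_length (by omega)
            have htj : (ys ++ [a]).take j = ys.take j :=
              List.take_append_of_le_length (by omega)
            have hlen : tail + ((ys ++ [a]).length - 1 - j) = (tail + 1) + (ys.length - 1 - j) := by
              simp only [List.length_append, List.length_cons, List.length_nil]
              omega
            by_cases hji : j < i
            · simp [hji, hti]
            · have hq : tail + 1 + (ys.length - 1 - j) = tail + (ys.length - j) := by omega
              simp [hji, htj, hq]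

-- ===== VERDICT (by name: the statement is the Claim_ definition above) =====
theorem check_if_german_number_spec : Claim_equal_check_if_german_number := by
  intro s _
  unfold Spec_check_if_german_number check_if_german_number check_if_german_number_alt
  rw [pvAltGo_eq_bSpec]
  dsimp only
  rw [pv_count_single, pv_count_single, pv_find_single,
      pv_pyGet_neg_one_getLast, pv_pyGet_neg_one_getLast]
  have hdp := pv_dotpos_last '.' s.toList 0
  simp only [Nat.cast_zero] at hdp
  rw [hdp, pv_splitOn_last]
  set l := s.toList with hl
  rw [pvBSpec]
  by_cases hcc : l.count ',' ≤ 1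
  · rcases hld : pvLastIdx '.' l with _ | j
    · -- no dot
      have hd0 : l.count '.' = 0 := (pvLastIdx_eq_none_iff '.' l).mp hld
      rcases hfc : pvLastIdx ',' l with _ | i
      · have hc0 : l.count ',' = 0 := (pvLastIdx_eq_none_iff ',' l).mp hfc
        simp [hld, hfc, hd0, hc0, pvFirst_eq_pvLast hcc]
      · have htake : ',' ∉ l.take i := by
          have := pv_count_take_last hfc
          have h0 : (l.take i).count ',' = 0 := by omega
          exact List.count_eq_zero.mp h0
        simp [hld, hfc, hd0, pvFirst_eq_pvLast hcc, htake, hcc]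
    · have hdpos : 0 < l.count '.' := by
        rcases Nat.eq_zero_or_pos (l.count '.') with h0 | h0
        · rw [← pvLastIdx_eq_none_iff] at h0; simp [h0] at hld
        · exact h0
      have hjlt : j < l.length := pvLastIdx_lt_length hld
      rcases hfc : pvLastIdx ',' l with _ | i
      · -- dot, no comma
        have hc0 : l.count ',' = 0 := (pvLastIdx_eq_none_iff ',' l).mp hfc
        have htake : ',' ∉ l.take j := by
          have hle : (l.take j).count ',' ≤ l.count ',' := (List.take_sublist j l).count_le ','
          exact List.count_eq_zero.mp (by omega)
        have hval : ((l.drop (j + 1)).length == 3) = (0 + (l.length - 1 - j) == 3) := by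
          rw [Bool.eq_iff_iff]
          simp only [beq_iff_eq, List.length_drop]
          omega
        simp only [hld, hfc, pvFirst_eq_pvLast hcc, hc0]
        simp [hdpos, htake, hval, hcc]
        omega
      · -- dot and comma
        have hc1 : l.count ',' = 1 := by
          have := pv_count_take_last hfc
          omega
        have hij : i ≠ j := by
          intro h
          have h1 := pvLastIdx_getElem? hfc
          have h2 := pvLastIdx_getElem? hld
          rw [h] at h1
          rw [h1] at h2
          cases h2
        have hA : (decide ((j : Int) < (i : Int))) = decide (j < i) := by
          simp
        simp only [hld, hfc, pvFirst_eq_pvLast hcc, hc1]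
        by_cases hji : j < i
        · have htake : ',' ∉ l.take i := by
            have := pv_count_take_last hfc
            have h0 : (l.take i).count ',' = 0 := by omega
            exact List.count_eq_zero.mp h0
          simp [hdpos, hji, htake, hcc, hc1]
        · -- i < j : comma lies inside l.take j
          have hij' : i < j := by omega
          have htake : ',' ∈ l.take j := by
            have h1 := pvLastIdx_getElem? hfc
            have : (l.take j)[i]? = some ',' := by
              rw [List.getElem?_take_of_lt hij']
              exact h1
            exact List.mem_of_getElem? this
          simp [hdpos, hji, htake, hcc, hc1]
  · -- more than one comma : both false
    have hA : (decide (l.count ',' ≤ 1)) = false := by simp [hcc]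
    rcases hfc : pvLastIdx ',' l with _ | i
    · have := (pvLastIdx_eq_none_iff ',' l).mp hfc; omega
    · have hi := pvLastIdx_lt_length hfc
      have htake : ',' ∈ l.take i := by
        have := pv_count_take_last hfc
        exact List.count_pos_iff.mp (by omega)
      rcases hld : pvLastIdx '.' l with _ | j
      · simp [hfc, hld, hA, htake, hcc]
      · have hj := pvLastIdx_lt_length hld
        by_cases hji : j < i
        · simp [hfc, hld, hA, htake, hji, hcc]
        · have hij' : i < j := by
            have hij : i ≠ j := by
              intro h
              have h1 := pvLastIdx_getElem? hfc
              have h2 := pvLastIdx_getElem? hld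
              rw [h] at h1; rw [h1] at h2; cases h2
            omega
          have htakej : ',' ∈ l.take j := by
            have h1 := pvLastIdx_getElem? hfc
            have : (l.take j)[i]? = some ',' := by
              rw [List.getElem?_take_of_lt hij']
              exact h1
            exact List.mem_of_getElem? this
          simp [hfc, hld, hA, htakej, hji, hcc]
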